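-- pv_equiv track=rewrite | github.com/j-anne/100daysofcode | dayThree/love_score.py | count_letter_for
-- ===== SOURCE A (Python) =====
-- def count_letter_for(name1, name2):
--     name1_lower = name1.lower()
--     name2_lower = name2.lower()
--     true = ["t", "r", "u", "e"]
--     love = ["l", "o", "v", "e"]
--     count_true = 0
--     count_love = 0
--
--     for letter in true:
--         count_true += name1_lower.count(letter)
--         count_true += name2_lower.count(letter)
--
--     for letter in love:
--         count_love += name1_lower.count(letter)
--         count_love += name2_lower.count(letter)
--
--     love_score = count_true * 10 + count_love
--
--     return love_score
-- ===== SOURCE B (Python) =====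
-- def count_letter_for(name1, name2):
--     score = 0
--     for ch in (name1 + name2).lower():
--         if ch in "true":
--             score += 10
--         if ch in "love":
--             score += 1
--     return score
-- ===== Notes on version B (the rewrite author's own statement) =====
-- stated objective: simpler
-- what changed: B makes one pass over the concatenated lowercased names and accumulates the final score directly (each character adds 10 if it is a 'true' letter and 1 if a 'love' letter), eliminating A's two intermediate group counts and its eight per-letter .count scans.
import Mathlib
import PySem

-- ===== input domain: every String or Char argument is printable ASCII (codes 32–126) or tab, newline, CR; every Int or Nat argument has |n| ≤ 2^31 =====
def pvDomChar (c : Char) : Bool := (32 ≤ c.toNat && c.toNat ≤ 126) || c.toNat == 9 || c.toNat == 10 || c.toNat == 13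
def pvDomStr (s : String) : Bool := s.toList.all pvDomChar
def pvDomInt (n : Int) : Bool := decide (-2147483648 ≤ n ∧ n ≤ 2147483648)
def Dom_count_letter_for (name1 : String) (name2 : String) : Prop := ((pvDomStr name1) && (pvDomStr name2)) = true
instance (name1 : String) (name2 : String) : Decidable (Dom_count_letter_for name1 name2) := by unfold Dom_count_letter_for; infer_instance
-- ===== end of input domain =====

-- B replaces A's two intermediate group counts and eight per-letter .count scans with a single
-- pass over the concatenated lowercased names that accumulates the score directly (objective: simpler).


-- ===== PORT A =====
def count_letter_for (name1 : String) (name2 : String) : Int :=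
  let name1_lower := PySem.Str.lower name1
  let name2_lower := PySem.Str.lower name2
  let true_ : List String := ["t", "r", "u", "e"]
  let love : List String := ["l", "o", "v", "e"]
  let count_true : Int := 0
  let count_love : Int := 0
  let count_true := true_.foldl
    (fun acc letter => acc + (PySem.Str.count name1_lower letter : Int)
                           + (PySem.Str.count name2_lower letter : Int)) count_true
  let count_love := love.foldl
    (fun acc letter => acc + (PySem.Str.count name1_lower letter : Int)
                           + (PySem.Str.count name2_lower letter : Int)) count_love
  let love_score := count_true * 10 + count_love
  love_score

-- ===== PORT B =====
-- 'ch in "true"' (single-char substring membership) is ported exactly as PySem.Chars.isIn [ch] ….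
def count_letter_for_alt (name1 : String) (name2 : String) : Int :=
  (PySem.Str.lower (name1 ++ name2)).toList.foldl
    (fun score ch =>
      let score := if PySem.Chars.isIn [ch] ("true".toList) then score + 10 else score
      if PySem.Chars.isIn [ch] ("love".toList) then score + 1 else score)
    0

-- ===== PRECONDITION & SPEC =====
def Spec_count_letter_for (name1 : String) (name2 : String) (out : Int) : Prop := out = count_letter_for_alt name1 name2
instance (name1 : String) (name2 : String) (out : Int) : Decidable (Spec_count_letter_for name1 name2 out) := by unfold Spec_count_letter_for; infer_instance

-- ===== CLAIM (what is proved, stated in full; the proofs are below) =====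
def Claim_equal_count_letter_for : Prop := ∀ (name1 : String) (name2 : String), Dom_count_letter_for name1 name2 → Spec_count_letter_for name1 name2 (count_letter_for name1 name2)

-- ===== LEMMAS AND PROOFS =====

-- Python's s.count(sub) for a single-character sub is the plain character count.
theorem chars_count_go_singleton (c : Char) (s : List Char) (acc fuel : Nat)
    (h : s.length ≤ fuel) :
    PySem.Chars.count.go [c] fuel s acc = acc + s.count c := by
  induction s generalizing acc fuel with
  | nil => cases fuel <;> simp [PySem.Chars.count.go]
  | cons hd tl ih =>
    cases fuel with
    | zero => simp at h
    | succ n =>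
      simp only [PySem.Chars.count.go, List.isPrefixOf, List.count_cons]
      by_cases hc : c == hd
      · simp only [hc, Bool.and_true, if_true]
        rw [List.length_singleton, List.drop_one, List.tail_cons,
          ih _ _ (by simpa using Nat.le_of_succ_le_succ h)]
        have : (hd == c) = true := by simpa [BEq.comm] using hc
        simp [this]; omega
      · simp only [Bool.and_eq_true] at *
        have hne : (hd == c) = false := by
          cases hbe : (hd == c) <;> simp_all [BEq.comm]
        simp only [hc] at *
        rw [ih _ _ (Nat.le_of_succ_le_succ h)]
        simp [hne]

theorem chars_count_singleton (s : List Char) (c : Char) :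
    PySem.Chars.count s [c] = s.count c := by
  simp [PySem.Chars.count, chars_count_go_singleton c s 0 s.length le_rfl]

theorem str_count_singleton (s sub : String) (c : Char) (h : sub.toList = [c]) :
    PySem.Str.count s sub = s.toList.count c := by
  rw [PySem.Str.count_eq, h, chars_count_singleton]

-- single-char 'in': [c] is an infix of l iff c is an element of l
theorem isIn_singleton (c : Char) (l : List Char) :
    PySem.Chars.isIn [c] l = l.contains c := by
  cases hb : l.contains c with
  | true =>
    have hm : c ∈ l := by simpa using hb
    have : [c] <:+: l := by
      obtain ⟨p, q, rfl⟩ := List.append_of_mem hm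
      exact ⟨p, q, by simp⟩
    simpa [PySem.Chars.isIn_iff_infix] using this
  | false =>
    have hm : c ∉ l := by simpa using hb
    rw [PySem.Chars.isIn_eq_false_iff]
    intro hinf
    exact hm (hinf.subset (by simp))

-- per-character contribution of B's loop body
theorem indicator_sum (cs : List Char) (hnd : cs.Nodup) (ch : Char) :
    (cs.map (fun c => if c = ch then (1:Int) else 0)).sum = if ch ∈ cs then 1 else 0 := by
  induction cs with
  | nil => simp
  | cons hd tl ih =>
    simp only [List.nodup_cons] at hnd
    rw [List.map_cons, List.sum_cons, ih hnd.2]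
    by_cases h : hd = ch
    · subst h; simp [hnd.1]
    · simp [h, Ne.symm h, List.mem_cons]

theorem sum_ind_eq_counts (l cs : List Char) (hnd : cs.Nodup) (k : Int) :
    (l.map (fun ch => if ch ∈ cs then k else 0)).sum
      = k * (cs.map (fun c => (l.count c : Int))).sum := by
  induction l with
  | nil => simp
  | cons hd tl ih =>
    rw [List.map_cons, List.sum_cons, ih]
    have hc : (cs.map (fun c => ((hd :: tl).count c : Int))).sum
        = (cs.map (fun c => (tl.count c : Int))).sum + (if hd ∈ cs then 1 else 0) := by
      have : ∀ c : Char, ((hd :: tl).count c : Int)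
          = (tl.count c : Int) + (if c = hd then 1 else 0) := by
        intro c; rw [List.count_cons]; push_cast; by_cases h : c = hd
        · simp [h]
        · simp [h, Ne.symm h]
      simp only [this]
      rw [List.sum_map_add, indicator_sum cs hnd hd]
    rw [hc]
    by_cases h : hd ∈ cs <;> simp [h] <;> ring

theorem count_letter_for_spec' (name1 name2 : String) :
    count_letter_for name1 name2 = count_letter_for_alt name1 name2 := by
  unfold count_letter_for count_letter_for_alt
  simp only [List.foldl_cons, List.foldl_nil]
  -- B side: rewrite the loop body to an additive form and turn the fold into a sum
  have hbody : (fun (score : Int) (ch : Char) =>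
      let score := if PySem.Chars.isIn [ch] ("true".toList) then score + 10 else score
      if PySem.Chars.isIn [ch] ("love".toList) then score + 1 else score)
    = fun score ch => score + ((if ch ∈ ("true".toList) then (10:Int) else 0)
                             + (if ch ∈ ("love".toList) then (1:Int) else 0)) := by
    funext score ch
    simp only [isIn_singleton, List.contains_eq_mem]
    split_ifs <;> simp_all <;> ring
  rw [hbody, PySem.List.foldl_add]
  rw [List.sum_map_add,
      sum_ind_eq_counts _ ("true".toList) (by decide) 10,
      sum_ind_eq_counts _ ("love".toList) (by decide) 1]
  have ht : ("true" : String).toList = ['t','r','u','e'] := by decide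
  have hl : ("love" : String).toList = ['l','o','v','e'] := by decide
  rw [str_count_singleton _ "t" 't' (by decide), str_count_singleton _ "t" 't' (by decide),
    str_count_singleton _ "r" 'r' (by decide), str_count_singleton _ "r" 'r' (by decide),
    str_count_singleton _ "u" 'u' (by decide), str_count_singleton _ "u" 'u' (by decide),
    str_count_singleton _ "e" 'e' (by decide), str_count_singleton _ "e" 'e' (by decide),
    str_count_singleton _ "l" 'l' (by decide), str_count_singleton _ "l" 'l' (by decide),
    str_count_singleton _ "o" 'o' (by decide), str_count_singleton _ "o" 'o' (by decide),
    str_count_singleton _ "v" 'v' (by decide), str_count_singleton _ "v" 'v' (by decide),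
    ht, hl]
  simp only [List.map_cons, List.map_nil, List.sum_cons, List.sum_nil,
    PySem.Str.toList_lower, String.toList_append, PySem.Chars.lower, List.map_append,
    List.count_append]
  push_cast
  ring

-- ===== VERDICT (by name: the statement is the Claim_ definition above) =====
theorem count_letter_for_spec : Claim_equal_count_letter_for := by
  intro name1 name2 _
  exact count_letter_for_spec' name1 name2
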